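-- pv_equiv track=rewrite | github.com/muhakbaryasin/mandirikupu2 | mandirikupu2/ErrorCodeController.py | createRegex
-- ===== SOURCE A (Python) =====
-- def createRegex(regex_string):
-- 	regex_string = regex_string.replace(' ', '')
-- 	gen_regex = '^'
-- 	split_regex = regex_string.split('{some_var}')
--
-- 	for iter, each in enumerate(split_regex):
-- 		if iter == 1:
-- 			gen_regex += '.*'
--
-- 		gen_regex += each
--
-- 		#if iter == len(split_regex) - 1 and iter > 0:
-- 		#	gen_regex += '$'
--
-- 	return gen_regex
-- ===== SOURCE B (Python) =====
-- def createRegex(regex_string):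
-- 	s = regex_string.replace(' ', '')
-- 	out = ['^']
-- 	seen = False
-- 	i, n = 0, len(s)
-- 	while i < n:
-- 		if s.startswith('{some_var}', i):
-- 			if not seen:
-- 				out.append('.*')
-- 				seen = True
-- 			i += 10
-- 		else:
-- 			out.append(s[i])
-- 			i += 1
-- 	return ''.join(out)
-- ===== Notes on version B (the rewrite author's own statement) =====
-- stated objective: alternative
-- what changed: Replaces split-on-placeholder plus enumerate-join with a single character-level scan of the cleaned string using a boolean flag: the first placeholder match emits the wildcard, later matches are skipped, other characters are copied.
import Mathlib
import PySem

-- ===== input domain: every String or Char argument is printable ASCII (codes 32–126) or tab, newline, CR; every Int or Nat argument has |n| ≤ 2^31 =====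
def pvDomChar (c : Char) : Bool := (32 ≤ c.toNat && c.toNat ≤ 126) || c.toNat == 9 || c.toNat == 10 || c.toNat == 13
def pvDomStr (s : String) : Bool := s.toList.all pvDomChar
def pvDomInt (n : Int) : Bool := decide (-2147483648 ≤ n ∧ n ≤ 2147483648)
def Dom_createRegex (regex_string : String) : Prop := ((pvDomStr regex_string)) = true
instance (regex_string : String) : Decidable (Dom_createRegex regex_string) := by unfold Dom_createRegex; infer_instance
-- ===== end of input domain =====

-- B replaces A's split-on-placeholder + enumerate loop by one character-level scan of the
-- cleaned string with a 'seen' flag ('alternative' decomposition, same cost).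

-- ===== PORT A =====
def createRegex (regex_string : String) : String :=
  let rs := PySem.Chars.replace regex_string.toList [' '] []
  let split_regex := PySem.Chars.splitOn rs "{some_var}".toList
  String.mk ((PySem.List.enumerate split_regex).foldl
    (fun gen p => (if p.1 == 1 then gen ++ ['.', '*'] else gen) ++ p.2) ['^'])

-- ===== PORT B =====
-- Source B's while loop: s.startswith('{some_var}', i) tested at each position (ported as
-- List.isPrefixOf on the suffix — exact for this fixed ASCII separator), first match
-- emits '.*', later matches are skipped, other characters are copied one by one.
def bScan : List Char → Bool → List Char
  | [], _ => []
  | c :: t, seen =>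
    if ("{some_var}".toList).isPrefixOf (c :: t) then
      (if seen then [] else ['.', '*']) ++ bScan (t.drop 9) true
    else c :: bScan t seen
termination_by l _ => l.length
decreasing_by all_goals simp

def createRegex_alt (regex_string : String) : String :=
  String.mk ('^' :: bScan (PySem.Chars.replace regex_string.toList [' '] []) false)

-- ===== PRECONDITION & SPEC =====
def Spec_createRegex (regex_string : String) (out : String) : Prop := out = createRegex_alt regex_string
instance (regex_string : String) (out : String) : Decidable (Spec_createRegex regex_string out) := by unfold Spec_createRegex; infer_instance

-- ===== CLAIM (what is proved, stated in full; the proofs are below) =====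
def Claim_equal_createRegex : Prop := ∀ (regex_string : String), Dom_createRegex regex_string → Spec_createRegex regex_string (createRegex regex_string)

-- ===== LEMMAS AND PROOFS =====

def pvSep : List Char := "{some_var}".toList

def pvMapHead (f : List Char → List Char) : List (List Char) → List (List Char)
  | [] => []
  | h :: t => f h :: t

-- clean structural recursion computing splitOn s pvSep
def pvSplitRec : List Char → List (List Char)
  | [] => [[]]
  | c :: t =>
    if pvSep.isPrefixOf (c :: t) then [] :: pvSplitRec (t.drop 9)
    else pvMapHead (c :: ·) (pvSplitRec t)
termination_by l => l.length
decreasing_by all_goals simp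

theorem pvSplitRec_ne_nil_aux (n : Nat) : ∀ l : List Char, l.length ≤ n → pvSplitRec l ≠ [] := by
  induction n with
  | zero =>
    intro l h
    have : l = [] := by cases l <;> simp_all
    subst this; simp [pvSplitRec]
  | succ n ih =>
    intro l h
    cases l with
    | nil => simp [pvSplitRec]
    | cons c t =>
      rw [pvSplitRec]
      split
      · simp
      · have ht : t.length ≤ n := by simp at h; omega
        cases hq : pvSplitRec t with
        | nil => exact absurd hq (ih t ht)
        | cons q r => simp [pvMapHead]

theorem pvSplitRec_ne_nil (l : List Char) : pvSplitRec l ≠ [] :=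
  pvSplitRec_ne_nil_aux l.length l le_rfl

theorem pvSplitOn_go_spec (fuel : Nat) :
    ∀ (l cur : List Char) (acc : List (List Char)), l.length < fuel →
    PySem.Chars.splitOn.go pvSep fuel l cur acc =
      acc.reverse ++ pvMapHead (cur.reverse ++ ·) (pvSplitRec l) := by
  induction fuel with
  | zero => intro l cur acc h; omega
  | succ n ih =>
    intro l cur acc h
    cases l with
    | nil =>
      simp [PySem.Chars.splitOn.go, pvSplitRec, pvMapHead]
    | cons c t =>
      rw [PySem.Chars.splitOn.go, pvSplitRec]
      by_cases hp : pvSep.isPrefixOf (c :: t) = true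
      · simp only [hp, if_pos]
        have hlen : (t.drop 9).length < n := by
          simp at h ⊢; omega
        rw [show (List.drop pvSep.length (c :: t)) = t.drop 9 from by
              simp [pvSep]]
        rw [ih (t.drop 9) [] (cur.reverse :: acc) hlen]
        cases hq : pvSplitRec (t.drop 9) <;> simp [pvMapHead]
      · simp only [hp, if_neg, Bool.false_eq_true, not_false_iff]
        have hlen : t.length < n := by simp at h; omega
        rw [ih t (c :: cur) acc hlen]
        cases hq : pvSplitRec t <;> simp [pvMapHead]

theorem pvSplitOn_eq (l : List Char) : PySem.Chars.splitOn l pvSep = pvSplitRec l := by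
  rw [PySem.Chars.splitOn, pvSplitOn_go_spec (l.length + 1) l [] [] (by omega)]
  cases hq : pvSplitRec l with
  | nil => exact absurd hq (pvSplitRec_ne_nil l)
  | cons q r => simp [pvMapHead]

-- once a placeholder has been seen, B's scan just deletes every further placeholder:
-- its output is the concatenation of the remaining split pieces
theorem pvScan_true (n : Nat) : ∀ (l : List Char), l.length ≤ n →
    bScan l true = (pvSplitRec l).flatten := by
  induction n with
  | zero =>
    intro l h
    have : l = [] := by cases l <;> simp_all
    subst this; simp [bScan, pvSplitRec]
  | succ n ih =>
    intro l h
    cases l with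
    | nil => simp [bScan, pvSplitRec]
    | cons c t =>
      rw [bScan, pvSplitRec]
      by_cases hp : pvSep.isPrefixOf (c :: t) = true
      · rw [show ("{some_var}".toList : List Char) = pvSep from rfl]
        simp only [hp, if_pos]
        have hdt : (t.drop 9).length ≤ n := by simp at h ⊢; omega
        simp [ih _ hdt]
      · rw [show ("{some_var}".toList : List Char) = pvSep from rfl]
        simp only [hp, if_neg, Bool.false_eq_true, not_false_iff]
        have ht : t.length ≤ n := by simp at h; omega
        have := ih t ht
        cases hq : pvSplitRec t with
        | nil => exact absurd hq (pvSplitRec_ne_nil t)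
        | cons q r =>
          rw [hq] at this
          simp [pvMapHead] at this ⊢
          simp [this]

-- before the first placeholder, B's scan copies the head piece, then emits '.*' and
-- concatenates the remaining pieces
theorem pvScan_false (n : Nat) : ∀ (l : List Char) (q : List Char) (r : List (List Char)),
    l.length ≤ n → pvSplitRec l = q :: r →
    bScan l false = q ++ (if r.isEmpty then [] else ['.', '*'] ++ r.flatten) := by
  induction n with
  | zero =>
    intro l q r h hs
    have : l = [] := by cases l <;> simp_all
    subst this
    simp [pvSplitRec] at hs
    simp [bScan, hs.1, ← hs.2]
  | succ n ih =>
    intro l q r h hs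
    cases l with
    | nil =>
      simp [pvSplitRec] at hs
      simp [bScan, hs.1, ← hs.2]
    | cons c t =>
      rw [pvSplitRec] at hs
      rw [bScan, show ("{some_var}".toList : List Char) = pvSep from rfl]
      by_cases hp : pvSep.isPrefixOf (c :: t) = true
      · simp only [hp, if_pos] at hs ⊢
        have hdt : (t.drop 9).length ≤ n := by simp at h ⊢; omega
        have hq : q = [] := by simp_all
        have hr : r = pvSplitRec (t.drop 9) := by simp_all
        subst hq hr
        have hne := pvSplitRec_ne_nil (t.drop 9)
        rw [pvScan_true (t.drop 9).length _ le_rfl]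
        cases hx : pvSplitRec (t.drop 9) with
        | nil => exact absurd hx hne
        | cons a b => simp
      · simp only [hp, if_neg, Bool.false_eq_true, not_false_iff] at hs ⊢
        have ht : t.length ≤ n := by simp at h; omega
        cases hx : pvSplitRec t with
        | nil => exact absurd hx (pvSplitRec_ne_nil t)
        | cons a b =>
          rw [hx] at hs
          simp [pvMapHead] at hs
          have hq : q = c :: a := by simp_all
          have hr : r = b := by simp_all
          rw [hq, hr, ih t a b ht hx]
          simp

-- A's loop over indices ≥ 2 just concatenates the pieces
theorem pvFoldTail (rest : List (List Char)) : ∀ (k : Int) (g : List Char), 2 ≤ k →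
    (PySem.List.enumerate rest k).foldl
      (fun gen p => (if p.1 == 1 then gen ++ ['.', '*'] else gen) ++ p.2) g
    = g ++ rest.flatten := by
  induction rest with
  | nil => intro k g hk; simp [PySem.List.enumerate_nil]
  | cons x xs ih =>
    intro k g hk
    rw [PySem.List.enumerate_cons]
    simp only [List.foldl_cons]
    have hk1 : (k == 1) = false := by simp; omega
    rw [hk1]
    simp only [Bool.false_eq_true, if_false]
    rw [ih (k + 1) (g ++ x) (by omega)]
    simp

-- ===== VERDICT (by name: the statement is the Claim_ definition above) =====
theorem createRegex_spec : Claim_equal_createRegex := by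
  intro regex_string _
  unfold Spec_createRegex createRegex createRegex_alt
  simp only []
  set s := PySem.Chars.replace regex_string.toList [' '] [] with hs
  rw [show ("{some_var}".toList : List Char) = pvSep from rfl, pvSplitOn_eq]
  obtain ⟨q, r, hqr⟩ : ∃ q r, pvSplitRec s = q :: r := by
    cases hq : pvSplitRec s with
    | nil => exact absurd hq (pvSplitRec_ne_nil _)
    | cons q r => exact ⟨q, r, rfl⟩
  rw [hqr, pvScan_false s.length s q r le_rfl hqr]
  cases r with
  | nil =>
    simp [PySem.List.enumerate_cons, PySem.List.enumerate_nil]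
  | cons x xs =>
    rw [PySem.List.enumerate_cons, PySem.List.enumerate_cons, List.foldl_cons,
      List.foldl_cons]
    rw [show ((0 : Int) + 1 + 1) = 2 from by norm_num]
    rw [pvFoldTail xs 2 _ (by omega)]
    simp [show ((0 : Int) == (1 : Int)) = false from by decide]
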